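-- pv_equiv track=rewrite | github.com/quang3152/ga-dcmst | dcmst/gen_tree.py | is_spanning_tree
-- ===== SOURCE A (Python) =====
-- class UnionFind:
--     def __init__(self, n):
--         self.parent = list(range(n))
--         self.rank = [0] * n
--
--     def find(self, x):
--         if self.parent[x] != x:
--             self.parent[x] = self.find(self.parent[x])
--         return self.parent[x]
--
--     def union(self, x, y):
--         px, py = self.find(x), self.find(y)
--         if px == py:
--             return
--         if self.rank[px] < self.rank[py]:
--             self.parent[px] = py
--         elif self.rank[px] > self.rank[py]:
--             self.parent[py] = px
--         else:
--             self.parent[py] = px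
--             self.rank[px] += 1
--
-- def is_spanning_tree(n, edges):
--     if len(edges) != n - 1:
--         return False
--     uf = UnionFind(n)
--     for u, v in edges:
--         if uf.find(u) == uf.find(v):
--             return False
--         uf.union(u, v)
--     return True
-- ===== SOURCE B (Python) =====
-- def is_spanning_tree(n, edges):
--     if len(edges) != n - 1:
--         return False
--     comp = list(range(n))
--     for u, v in edges:
--         cu, cv = comp[u], comp[v]
--         if cu == cv:
--             return False
--         comp = [cu if c == cv else c for c in comp]
--     return True
-- ===== Notes on version B (the rewrite author's own statement) =====
-- stated objective: simpler
-- what changed: Replaced the recursive union-find (path compression + union by rank) with a flat component-label list that is relabeled wholesale on each merge, so B needs no UnionFind class, no recursion and no rank bookkeeping.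
-- outside the precondition, e.g. on is_spanning_tree(4, [(0, 1), (1, 0), (9, 9)]): A returns False, B returns False
import Mathlib
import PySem

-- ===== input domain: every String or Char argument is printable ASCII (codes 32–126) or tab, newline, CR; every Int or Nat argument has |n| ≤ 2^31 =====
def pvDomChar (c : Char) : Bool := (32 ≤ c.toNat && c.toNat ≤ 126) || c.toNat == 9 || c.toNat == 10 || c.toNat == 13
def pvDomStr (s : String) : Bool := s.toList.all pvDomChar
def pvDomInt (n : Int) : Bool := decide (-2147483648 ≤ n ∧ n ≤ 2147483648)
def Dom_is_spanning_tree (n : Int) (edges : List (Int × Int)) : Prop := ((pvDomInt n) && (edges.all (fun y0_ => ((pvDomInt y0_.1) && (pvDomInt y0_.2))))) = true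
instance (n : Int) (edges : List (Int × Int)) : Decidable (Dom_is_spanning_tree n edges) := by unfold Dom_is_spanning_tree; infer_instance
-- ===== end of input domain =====

-- B replaces the recursive union-find (path compression + union by rank) of A with a flat
-- component-label list relabeled on each merge: shorter and plainer, same return value.

-- ===== PORT A =====
-- UnionFind.find, with fuel making the Python recursion structural; the recursion terminates in
-- Python because parent chains are acyclic, and fuel = parent.length + 1 is proved sufficient in
-- the lemmas below.  none = IndexError.
def ufFind (fuel : Nat) (parent : List Int) (x : Int) : Option (Int × List Int) :=
  match fuel with
  | 0 => none
  | fuel + 1 =>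
    match PySem.List.pyGet? parent x with
    | none => none
    | some p =>
      if p ≠ x then
        match ufFind fuel parent p with
        | none => none
        | some (r, par1) =>
          match PySem.List.pySet? par1 x r with
          | none => none
          | some par2 =>
            match PySem.List.pyGet? par2 x with
            | none => none
            | some q => some (q, par2)
      else some (p, parent)

-- UnionFind.union; returns the updated (parent, rank) pair.
def ufUnion (fuel : Nat) (parent rank : List Int) (x y : Int) : Option (List Int × List Int) :=
  match ufFind fuel parent x with
  | none => none
  | some (px, par1) =>
    match ufFind fuel par1 y with
    | none => none
    | some (py, par2) =>
      if px = py then some (par2, rank)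
      else
        match PySem.List.pyGet? rank px, PySem.List.pyGet? rank py with
        | some rx, some ry =>
          if rx < ry then
            match PySem.List.pySet? par2 px py with
            | none => none
            | some par3 => some (par3, rank)
          else if rx > ry then
            match PySem.List.pySet? par2 py px with
            | none => none
            | some par3 => some (par3, rank)
          else
            match PySem.List.pySet? par2 py px with
            | none => none
            | some par3 =>
              match PySem.List.pyGet? rank px with
              | none => none
              | some rpx =>
                match PySem.List.pySet? rank px (rpx + 1) with
                | none => none
                | some rank2 => some (par3, rank2)
        | _, _ => none

-- the 'for u, v in edges' loop of A
def ufLoop (fuel : Nat) (parent rank : List Int) : List (Int × Int) → Option Bool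
  | [] => some true
  | (u, v) :: rest =>
    match ufFind fuel parent u with
    | none => none
    | some (ru, par1) =>
      match ufFind fuel par1 v with
      | none => none
      | some (rv, par2) =>
        if ru = rv then some false
        else
          match ufUnion fuel par2 rank u v with
          | none => none
          | some (par3, rank3) => ufLoop fuel par3 rank3 rest

def is_spanning_tree (n : Int) (edges : List (Int × Int)) : Bool :=
  if (edges.length : Int) ≠ n - 1 then false
  else
    let parent := PySem.List.pyRange 0 n 1        -- list(range(n))
    let rank := List.replicate n.toNat (0 : Int)  -- [0] * n
    match ufLoop (parent.length + 1) parent rank edges with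
    | some b => b
    | none => false   -- IndexError in Python; outside Pre_

-- ===== PORT B =====
-- the 'for u, v in edges' loop of B over the component-label list
def relabelLoop (comp : List Int) : List (Int × Int) → Option Bool
  | [] => some true
  | (u, v) :: rest =>
    match PySem.List.pyGet? comp u, PySem.List.pyGet? comp v with
    | some cu, some cv =>
      if cu = cv then some false
      else relabelLoop (comp.map (fun c => if c = cv then cu else c)) rest
    | _, _ => none

def is_spanning_tree_alt (n : Int) (edges : List (Int × Int)) : Bool :=
  if (edges.length : Int) ≠ n - 1 then false
  else
    match relabelLoop (PySem.List.pyRange 0 n 1) edges with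
    | some b => b
    | none => false   -- IndexError in Python; outside Pre_

-- ===== PRECONDITION & SPEC =====
-- Pre_ excludes edge lists containing an out-of-range endpoint when len(edges) = n - 1: there both
-- programs raise IndexError at the same edge, unless an earlier edge inside one component makes
-- both return False first (see the cited excluded example, on which both return False).
def Pre_is_spanning_tree (n : Int) (edges : List (Int × Int)) : Prop :=
  (edges.length : Int) ≠ n - 1 ∨ ∀ e ∈ edges, (-n ≤ e.1 ∧ e.1 < n) ∧ (-n ≤ e.2 ∧ e.2 < n)
instance (n : Int) (edges : List (Int × Int)) : Decidable (Pre_is_spanning_tree n edges) := by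
  unfold Pre_is_spanning_tree; infer_instance

def pvWitness_is_spanning_tree : Int × (List (Int × Int)) := (3, [(0, 1), (1, 2)])

def Spec_is_spanning_tree (n : Int) (edges : List (Int × Int)) (out : Bool) : Prop := out = is_spanning_tree_alt n edges
instance (n : Int) (edges : List (Int × Int)) (out : Bool) : Decidable (Spec_is_spanning_tree n edges out) := by unfold Spec_is_spanning_tree; infer_instance

-- ===== CLAIM (what is proved, stated in full; the proofs are below) =====
def Claim_equal_is_spanning_tree : Prop := ∀ (n : Int) (edges : List (Int × Int)), Dom_is_spanning_tree n edges → Pre_is_spanning_tree n edges → Spec_is_spanning_tree n edges (is_spanning_tree n edges)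

-- ===== LEMMAS AND PROOFS =====

-- Python index wraparound, for a negative in-range index
theorem pyGet?_wrap {α : Type} (xs : List α) (i : Int) (h1 : -(xs.length : Int) ≤ i)
    (h2 : i < 0) : PySem.List.pyGet? xs i = PySem.List.pyGet? xs (i + xs.length) := by
  simp only [PySem.List.pyGet?, PySem.List.pyIdx?]
  have hlen : 0 ≤ (xs.length : Int) := by positivity
  rw [if_neg (by omega), if_pos h1, if_pos (by omega : (0:Int) ≤ i + xs.length),
    if_pos (by omega : i + (xs.length : Int) < xs.length)]
  have h : xs.length - (-i).toNat = (i + xs.length).toNat := by omega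
  rw [h]

theorem pyGet?_some_of_range {α : Type} (xs : List α) (i : Int) (h1 : 0 ≤ i)
    (h2 : i < xs.length) : ∃ a, PySem.List.pyGet? xs i = some a := by
  simp only [PySem.List.pyGet?, PySem.List.pyIdx?, if_pos h1, if_pos h2]
  have : i.toNat < xs.length := by omega
  exact ⟨xs[i.toNat], by simp [List.getElem?_eq_getElem this]⟩

theorem pyGet?_lt {α : Type} {xs : List α} {i : Int} {a : α}
    (h : PySem.List.pyGet? xs i = some a) (h1 : 0 ≤ i) : i < xs.length := by
  by_contra hge
  simp only [PySem.List.pyGet?, PySem.List.pyIdx?, if_pos h1, if_neg hge] at h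
  simp at h

theorem pySet?_nonneg {α : Type} (xs : List α) (i : Int) (v : α) (h1 : 0 ≤ i)
    (h2 : i < xs.length) : PySem.List.pySet? xs i v = some (xs.set i.toNat v) := by
  simp [PySem.List.pySet?, PySem.List.pyIdx?, if_pos h1, if_pos h2]

theorem pySet?_neg {α : Type} (xs : List α) (i : Int) (v : α) (h1 : -(xs.length : Int) ≤ i)
    (h2 : i < 0) : PySem.List.pySet? xs i v = some (xs.set (i + xs.length).toNat v) := by
  simp only [PySem.List.pySet?, PySem.List.pyIdx?]
  rw [if_neg (by omega), if_pos h1]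
  simp only [Option.map_some]
  congr 2
  omega

theorem pyGet?_set (xs : List Int) (j : Nat) (v : Int) (i : Int) (h1 : 0 ≤ i) :
    PySem.List.pyGet? (xs.set j v) i =
      if i = j ∧ j < xs.length then some v else PySem.List.pyGet? xs i := by
  rw [PySem.List.pyGet?_of_nonneg _ h1, PySem.List.pyGet?_of_nonneg _ h1, List.getElem?_set]
  split_ifs with ha hb hc hd
  · rfl
  · exfalso; omega
  · exfalso; omega
  · symm; rw [List.getElem?_eq_none_iff]; omega
  · exfalso; omega
  · rfl

-- the parent-pointer chain from x to its root r, visiting the (distinct) nodes l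
inductive RPath (parent : List Int) : Int → Int → List Int → Prop
  | root (x : Int) (hget : PySem.List.pyGet? parent x = some x)
      (hx : 0 ≤ x) : RPath parent x x [x]
  | step (x p r : Int) (l : List Int)
      (hget : PySem.List.pyGet? parent x = some p) (hx : 0 ≤ x) (hne : p ≠ x)
      (htail : RPath parent p r l) : RPath parent x r (x :: l)

def IsRoot (parent : List Int) (r : Int) : Prop :=
  PySem.List.pyGet? parent r = some r ∧ 0 ≤ r

theorem RPath_root {parent : List Int} {x r : Int} {l : List Int}
    (h : RPath parent x r l) : IsRoot parent r := by
  induction h with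
  | root x hget hx => exact ⟨hget, hx⟩
  | step x p r l hget hx hne htail ih => exact ih

theorem RPath_nonneg {parent : List Int} {x r : Int} {l : List Int}
    (h : RPath parent x r l) : 0 ≤ x := by
  cases h with
  | root _ _ hx => exact hx
  | step _ _ _ _ _ hx _ _ => exact hx

theorem RPath_det {parent : List Int} {x r r' : Int} {l l' : List Int}
    (h : RPath parent x r l) (h' : RPath parent x r' l') : r = r' ∧ l = l' := by
  induction h generalizing r' l' with
  | root x hget hx =>
    cases h' with
    | root => exact ⟨rfl, rfl⟩
    | step _ p _ _ hget' _ hne' _ =>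
      rw [hget] at hget'; cases hget'; exact absurd rfl hne'
  | step x p r l hget hx hne htail ih =>
    cases h' with
    | root _ hget' _ => rw [hget] at hget'; cases hget'; exact absurd rfl hne
    | step _ p' _ l2 hget' _ hne' htail' =>
      rw [hget] at hget'; cases hget'
      obtain ⟨h1, h2⟩ := ih htail'
      exact ⟨h1, by rw [h2]⟩

theorem RPath_mem {parent : List Int} {x r : Int} {l : List Int}
    (h : RPath parent x r l) : ∀ y ∈ l, ∃ ly, RPath parent y r ly := by
  induction h with
  | root x hget hx =>
    intro y hy; rw [List.mem_singleton] at hy; subst hy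
    exact ⟨[y], RPath.root y hget hx⟩
  | step x p r l hget hx hne htail ih =>
    intro y hy
    rcases List.mem_cons.mp hy with h1 | h2
    · subst h1; exact ⟨_, RPath.step _ _ _ _ hget hx hne htail⟩
    · exact ih y h2

theorem RPath_elem_range {parent : List Int} {x r : Int} {l : List Int}
    (h : RPath parent x r l) : ∀ y ∈ l, 0 ≤ y ∧ y < parent.length := by
  induction h with
  | root x hget hx =>
    intro y hy; rw [List.mem_singleton] at hy; subst hy
    exact ⟨hx, pyGet?_lt hget hx⟩
  | step x p r l hget hx hne htail ih =>
    intro y hy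
    rcases List.mem_cons.mp hy with h1 | h2
    · subst h1; exact ⟨hx, pyGet?_lt hget hx⟩
    · exact ih y h2

theorem RPath_len_le {parent : List Int} {x r : Int} {l : List Int}
    (h : RPath parent x r l) (hnd : l.Nodup) : l.length ≤ parent.length := by
  have hrange := RPath_elem_range h
  classical
  have hsub : l.toFinset ⊆ (Finset.Ico (0 : Int) parent.length) := by
    intro y hy
    rw [List.mem_toFinset] at hy
    rw [Finset.mem_Ico]
    exact hrange y hy
  have hcard := Finset.card_le_card hsub
  rw [List.toFinset_card_of_nodup hnd] at hcard
  simpa using hcard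

theorem RPath_ne_root {parent : List Int} {x p r : Int} {l : List Int}
    (h : RPath parent x r l) (hget : PySem.List.pyGet? parent x = some p) (hne : p ≠ x) :
    x ≠ r := by
  intro hxr
  subst hxr
  obtain ⟨hr, _⟩ := RPath_root h
  rw [hget] at hr; cases hr; exact hne rfl

-- pointwise description of the parent list after a find with path compression along l
def CSpec (parent : List Int) (l : List Int) (r : Int) (p' : List Int) : Prop :=
  p'.length = parent.length ∧
  ∀ i : Int, 0 ≤ i →
    PySem.List.pyGet? p' i =
      if i ∈ l ∧ i ≠ r then some r else PySem.List.pyGet? parent i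

-- find, nonnegative starting index
theorem ufFind_go {parent : List Int} {x r : Int} {l : List Int} (hp : RPath parent x r l) :
    ∀ fuel : Nat, l.length ≤ fuel →
      ∃ p', ufFind fuel parent x = some (r, p') ∧ CSpec parent l r p' := by
  induction hp with
  | root x hget hx =>
    intro fuel hf
    match fuel, hf with
    | fuel + 1, _ =>
      refine ⟨parent, ?_, rfl, ?_⟩
      · simp [ufFind, hget]
      · intro i hi
        rw [if_neg]
        rintro ⟨hmem, hne⟩
        rw [List.mem_singleton] at hmem
        exact hne (by rw [hmem])
  | step x p r l hget hx hne htail ih =>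
    intro fuel hf
    match fuel, hf with
    | fuel + 1, hf =>
      have hxr : x ≠ r := RPath_ne_root (RPath.step x p r l hget hx hne htail) hget hne
      obtain ⟨p1, hrec, hlen1, hpt1⟩ := ih fuel (by simpa using Nat.lt_succ_iff.mp (by simpa using hf))
      have hxlt := pyGet?_lt hget hx
      have hset := pySet?_nonneg p1 x r hx (by rw [hlen1]; exact hxlt)
      have hget2 : PySem.List.pyGet? (p1.set x.toNat r) x = some r := by
        rw [pyGet?_set _ _ _ _ hx, if_pos ⟨by omega, by rw [hlen1]; omega⟩]
      refine ⟨p1.set x.toNat r, ?_, ?_, ?_⟩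
      · simp [ufFind, hget, hrec, hset, hget2, hne]
      · rw [List.length_set, hlen1]
      · intro i hi
        rw [pyGet?_set _ _ _ _ hi]
        by_cases hix : i = x
        · subst hix
          rw [if_pos ⟨by omega, by rw [hlen1]; omega⟩, if_pos ⟨List.mem_cons_self, hxr⟩]
        · rw [if_neg (by rintro ⟨h1, _⟩; exact hix (by omega)), hpt1 i hi]
          congr 1
          simp only [List.mem_cons, eq_iff_iff]
          constructor
          · rintro ⟨h1, h2⟩; exact ⟨Or.inr h1, h2⟩
          · rintro ⟨h1 | h1, h2⟩
            · exact absurd h1 hix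
            · exact ⟨h1, h2⟩

-- find, any in-range starting index (Python wraparound for negative x)
theorem ufFind_any {parent : List Int} {x r : Int} {l : List Int} {fuel : Nat}
    (hx1 : -(parent.length : Int) ≤ x) (hx2 : x < parent.length)
    (hp : RPath parent (if x < 0 then x + parent.length else x) r l)
    (hf : l.length + 1 ≤ fuel) :
    ∃ p', ufFind fuel parent x = some (r, p') ∧ CSpec parent l r p' := by
  rcases lt_or_ge x 0 with hneg | hpos
  · rw [if_pos hneg] at hp
    match fuel, hf with
    | fuel + 1, hf =>
      have hwrap := pyGet?_wrap parent x hx1 hneg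
      have hx'0 : (0 : Int) ≤ x + parent.length := by omega
      have hx'lt : x + (parent.length : Int) < parent.length := by omega
      cases hp with
      | root _ hget hxp =>
        obtain ⟨p1, hrec, hlen1, hpt1⟩ :=
          ufFind_go (RPath.root _ hget hxp) fuel (by simp at hf ⊢; omega)
        have hset := pySet?_neg p1 x (x + (parent.length : Int))
          (by rw [hlen1]; exact hx1) hneg
        have hidx : (x + (p1.length : Int)).toNat = (x + (parent.length : Int)).toNat := by
          rw [hlen1]
        rw [hidx] at hset
        have hget2 : PySem.List.pyGet?
            (p1.set (x + (parent.length : Int)).toNat (x + (parent.length : Int))) x =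
            some (x + (parent.length : Int)) := by
          rw [pyGet?_wrap _ x (by simp [hlen1]; omega) hneg]
          simp only [List.length_set, hlen1]
          rw [pyGet?_set _ _ _ _ hx'0, if_pos ⟨by omega, by rw [hlen1]; omega⟩]
        refine ⟨p1.set (x + (parent.length : Int)).toNat (x + (parent.length : Int)), ?_, ?_, ?_⟩
        · simp only [ufFind, hwrap, hget]
          rw [if_pos (by omega : x + (parent.length : Int) ≠ x)]
          simp only [hrec, hset, hget2]
        · rw [List.length_set, hlen1]
        · intro i hi
          rw [pyGet?_set _ _ _ _ hi]
          by_cases hix : i = x + (parent.length : Int)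
          · rw [if_pos ⟨by omega, by rw [hlen1]; omega⟩,
              if_neg (by rintro ⟨_, hne2⟩; exact hne2 hix), hix, hget]
          · rw [if_neg (by rintro ⟨h1, _⟩; exact hix (by omega)), hpt1 i hi]
      | step _ p _ _ hget hxp hnep htail =>
        have hfull : RPath parent (x + (parent.length : Int)) r _ :=
          RPath.step _ p r _ hget hxp hnep htail
        have hxr : x + (parent.length : Int) ≠ r := RPath_ne_root hfull hget hnep
        obtain ⟨p1, hrec, hlen1, hpt1⟩ := ufFind_go htail fuel (by simp at hf ⊢; omega)
        have hset := pySet?_neg p1 x r (by rw [hlen1]; exact hx1) hneg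
        have hidx : (x + (p1.length : Int)).toNat = (x + (parent.length : Int)).toNat := by
          rw [hlen1]
        rw [hidx] at hset
        have hget2 : PySem.List.pyGet?
            (p1.set (x + (parent.length : Int)).toNat r) x = some r := by
          rw [pyGet?_wrap _ x (by simp [hlen1]; omega) hneg]
          simp only [List.length_set, hlen1]
          rw [pyGet?_set _ _ _ _ hx'0, if_pos ⟨by omega, by rw [hlen1]; omega⟩]
        have hp0 : 0 ≤ p := RPath_nonneg htail
        refine ⟨p1.set (x + (parent.length : Int)).toNat r, ?_, ?_, ?_⟩
        · simp only [ufFind, hwrap, hget]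
          rw [if_pos (by omega : p ≠ x)]
          simp only [hrec, hset, hget2]
        · rw [List.length_set, hlen1]
        · intro i hi
          rw [pyGet?_set _ _ _ _ hi]
          by_cases hix : i = x + (parent.length : Int)
          · rw [if_pos ⟨by omega, by rw [hlen1]; omega⟩,
              if_pos ⟨by rw [hix]; exact List.mem_cons_self, by rw [hix]; exact hxr⟩]
          · rw [if_neg (by rintro ⟨h1, _⟩; exact hix (by omega)), hpt1 i hi]
            congr 1
            simp only [List.mem_cons, eq_iff_iff]
            constructor
            · rintro ⟨h1, h2⟩; exact ⟨Or.inr h1, h2⟩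
            · rintro ⟨h1 | h1, h2⟩
              · exact absurd h1 hix
              · exact ⟨h1, h2⟩
  · rw [if_neg (by omega)] at hp
    exact ufFind_go hp fuel (by omega)

-- compression preserves every path's root (with control of the visited nodes)
theorem CSpec_rpath {parent p' : List Int} {l : List Int} {x0 r : Int}
    (hp : RPath parent x0 r l) (hc : CSpec parent l r p') :
    ∀ y ry ly, RPath parent y ry ly → ly.Nodup →
      ∃ ly', RPath p' y ry ly' ∧ ly'.Nodup ∧ ly' ⊆ (ly ++ [ry]) := by
  obtain ⟨hroot, hr0⟩ := RPath_root hp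
  have hrootp' : PySem.List.pyGet? p' r = some r := by
    rw [hc.2 r hr0, if_neg (by rintro ⟨_, h⟩; exact h rfl)]
    exact hroot
  intro y ry ly h hnd
  induction h with
  | root z hget hz =>
    have hz' : PySem.List.pyGet? p' z = some z := by
      rw [hc.2 z hz]
      split_ifs with hcond
      · obtain ⟨lz, hlz⟩ := RPath_mem hp z hcond.1
        obtain ⟨hrz, -⟩ := RPath_det hlz (RPath.root z hget hz)
        exact absurd hrz.symm hcond.2
      · exact hget
    exact ⟨[z], RPath.root z hz' hz, List.nodup_singleton z, by
      intro a ha; rw [List.mem_singleton] at ha; subst ha; simp⟩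
  | step z p rz lz hget hz hnez htail ih =>
    have hzr : z ≠ rz := RPath_ne_root (RPath.step z p rz lz hget hz hnez htail) hget hnez
    rw [List.nodup_cons] at hnd
    by_cases hcond : z ∈ l ∧ z ≠ r
    · -- z lies on the compressed path, so rz = r and p' points z straight at r
      obtain ⟨lz2, hlz2⟩ := RPath_mem hp z hcond.1
      obtain ⟨hrz, -⟩ := RPath_det hlz2 (RPath.step z p rz lz hget hz hnez htail)
      subst hrz
      have hgz : PySem.List.pyGet? p' z = some r := by
        rw [hc.2 z hz, if_pos hcond]
      refine ⟨[z, r], ?_, ?_, ?_⟩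
      · exact RPath.step z r r [r] hgz hz (Ne.symm hcond.2) (RPath.root r hrootp' hr0)
      · simp [hcond.2]
      · intro a ha
        rcases List.mem_cons.mp ha with h1 | h1
        · subst h1; simp
        · rw [List.mem_singleton] at h1; subst h1; simp
    · have hgz : PySem.List.pyGet? p' z = some p := by
        rw [hc.2 z hz, if_neg hcond]
        exact hget
      obtain ⟨ly', hP, hnd', hsub⟩ := ih hnd.2
      have hzrz : z ∉ ly' := by
        intro hmem
        rcases List.mem_append.mp (hsub hmem) with h1 | h1
        · exact hnd.1 h1
        · rw [List.mem_singleton] at h1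
          exact hzr h1
      refine ⟨z :: ly', RPath.step z p rz ly' hgz hz hnez hP, List.nodup_cons.mpr ⟨hzrz, hnd'⟩, ?_⟩
      intro a ha
      rcases List.mem_cons.mp ha with h1 | h1
      · subst h1; simp
      · have := hsub h1
        simp only [List.cons_append, List.mem_cons]
        exact Or.inr (by simpa using this)

theorem CSpec_root_iff {parent p' : List Int} {l : List Int} {x0 r : Int}
    (hp : RPath parent x0 r l) (hc : CSpec parent l r p') (y : Int) :
    (IsRoot p' y ↔ IsRoot parent y) := by
  obtain ⟨hroot, hr0⟩ := RPath_root hp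
  constructor
  · rintro ⟨hget, hy⟩
    refine ⟨?_, hy⟩
    rw [hc.2 y hy] at hget
    split_ifs at hget with hcond
    · cases hget
      exact absurd rfl hcond.2
    · exact hget
  · rintro ⟨hget, hy⟩
    refine ⟨?_, hy⟩
    rw [hc.2 y hy]
    split_ifs with hcond
    · obtain ⟨ly, hly⟩ := RPath_mem hp y hcond.1
      obtain ⟨hry, -⟩ := RPath_det hly (RPath.root y hget hy)
      exact absurd hry.symm hcond.2
    · exact hget

-- the coupling invariant between A's union-find state and B's label list
def StInv (parent rank comp : List Int) : Prop :=
  parent.length = comp.length ∧ rank.length = comp.length ∧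
  (∀ x : Int, 0 ≤ x → x < comp.length →
    ∃ r l, RPath parent x r l ∧ l.Nodup ∧
      PySem.List.pyGet? comp r = PySem.List.pyGet? comp x) ∧
  (∀ r r' : Int, IsRoot parent r → IsRoot parent r' →
      PySem.List.pyGet? comp r = PySem.List.pyGet? comp r' → r = r')

theorem StInv_cspec {parent rank comp p' : List Int} {l : List Int} {x0 r : Int}
    (hInv : StInv parent rank comp) (hp : RPath parent x0 r l) (hc : CSpec parent l r p') :
    StInv p' rank comp := by
  obtain ⟨hlenP, hlenR, hpaths, hinj⟩ := hInv
  refine ⟨by rw [hc.1, hlenP], hlenR, ?_, ?_⟩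
  · intro x hx hxlt
    obtain ⟨r0, l0, hP, hnd0, hlab⟩ := hpaths x hx hxlt
    obtain ⟨l0', hP', hnd', -⟩ := CSpec_rpath hp hc x r0 l0 hP hnd0
    exact ⟨r0, l0', hP', hnd', hlab⟩
  · intro r1 r2 h1 h2 hlab
    exact hinj r1 r2 ((CSpec_root_iff hp hc r1).mp h1) ((CSpec_root_iff hp hc r2).mp h2) hlab

theorem RPath_untouched {parent q : List Int} {y ry : Int} {ly : List Int}
    (h : RPath parent y ry ly) (hsame : ∀ i ∈ ly, PySem.List.pyGet? q i = PySem.List.pyGet? parent i) :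
    RPath q y ry ly := by
  induction h with
  | root z hget hz =>
    exact RPath.root z (by rw [hsame z (List.mem_singleton_self z)]; exact hget) hz
  | step z p rz lz hget hz hnez htail ih =>
    refine RPath.step z p rz lz ?_ hz hnez (ih ?_)
    · rw [hsame z List.mem_cons_self]; exact hget
    · intro i hi
      exact hsame i (List.mem_cons_of_mem z hi)

theorem RPath_snoc {parent q : List Int} {y r w : Int} {ly : List Int}
    (h : RPath parent y r ly)
    (hsame : ∀ i ∈ ly, i ≠ r → PySem.List.pyGet? q i = PySem.List.pyGet? parent i)
    (hqr : PySem.List.pyGet? q r = some w) (hwr : w ≠ r)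
    (hqw : PySem.List.pyGet? q w = some w) (hw0 : 0 ≤ w) :
    RPath q y w (ly ++ [w]) := by
  induction h with
  | root z hget hz =>
    exact RPath.step z w w [w] hqr hz hwr (RPath.root w hqw hw0)
  | step z p rz lz hget hz hnez htail ih =>
    have hzr : z ≠ rz := RPath_ne_root (RPath.step z p rz lz hget hz hnez htail) hget hnez
    refine RPath.step z p w (lz ++ [w]) ?_ hz hnez (ih ?_ hqr hwr)
    · rw [hsame z List.mem_cons_self hzr]; exact hget
    · intro i hi hir
      exact hsame i (List.mem_cons_of_mem z hi) hir

theorem pyGet?_map {α β : Type} (f : α → β) (xs : List α) (i : Int) :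
    PySem.List.pyGet? (xs.map f) i = (PySem.List.pyGet? xs i).map f := by
  simp only [PySem.List.pyGet?, PySem.List.pyIdx?, List.length_map]
  split_ifs <;> simp [List.getElem?_map]

-- merging the class of root s into the class of root w, with B's matching relabel
theorem StInv_union {parent rank rank' comp : List Int} {ru rv cu cv w s : Int}
    (hInv : StInv parent rank comp)
    (hru : IsRoot parent ru) (hrv : IsRoot parent rv) (hne : ru ≠ rv)
    (hcu : PySem.List.pyGet? comp ru = some cu) (hcv : PySem.List.pyGet? comp rv = some cv)
    (hw : (w = ru ∧ s = rv) ∨ (w = rv ∧ s = ru)) (hrk : rank'.length = comp.length) :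
    StInv (parent.set s.toNat w) rank' (comp.map fun c => if c = cv then cu else c) := by
  obtain ⟨hlenP, hlenR, hpaths, hinj⟩ := hInv
  have hcu_ne_cv : cu ≠ cv := by
    intro h
    exact hne (hinj ru rv hru hrv (by rw [hcu, hcv, h]))
  have hwroot : IsRoot parent w := by rcases hw with ⟨h1, -⟩ | ⟨h1, -⟩ <;> subst h1 <;> assumption
  have hsroot : IsRoot parent s := by rcases hw with ⟨-, h2⟩ | ⟨-, h2⟩ <;> subst h2 <;> assumption
  have hsw : w ≠ s := by
    rcases hw with ⟨h1, h2⟩ | ⟨h1, h2⟩ <;> subst h1 <;> subst h2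
    · exact hne
    · exact Ne.symm hne
  have hfw : ((PySem.List.pyGet? comp w).map fun c => if c = cv then cu else c) = some cu := by
    rcases hw with ⟨h1, -⟩ | ⟨h1, -⟩ <;> subst h1
    · rw [hcu]; simp
    · rw [hcv]; simp
  have hfs : ((PySem.List.pyGet? comp s).map fun c => if c = cv then cu else c) = some cu := by
    rcases hw with ⟨-, h2⟩ | ⟨-, h2⟩ <;> subst h2
    · rw [hcv]; simp
    · rw [hcu]; simp
  have hs0 : 0 ≤ s := hsroot.2
  have hslt : s < parent.length := pyGet?_lt hsroot.1 hs0
  have hw0 : 0 ≤ w := hwroot.2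
  have hqget : ∀ i : Int, 0 ≤ i → PySem.List.pyGet? (parent.set s.toNat w) i =
      if i = s then some w else PySem.List.pyGet? parent i := by
    intro i hi
    rw [pyGet?_set _ _ _ _ hi]
    exact if_congr ⟨fun ⟨h1, _⟩ => by omega, fun h1 => ⟨by omega, by omega⟩⟩ rfl rfl
  have hqw : PySem.List.pyGet? (parent.set s.toNat w) w = some w := by
    rw [hqget w hw0, if_neg hsw]; exact hwroot.1
  have hrootq : ∀ z : Int, IsRoot (parent.set s.toNat w) z ↔ (IsRoot parent z ∧ z ≠ s) := by
    intro z
    constructor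
    · rintro ⟨hg, hz⟩
      rw [hqget z hz] at hg
      split_ifs at hg with hzs
      · cases hg
        exact absurd hzs hsw
      · exact ⟨⟨hg, hz⟩, hzs⟩
    · rintro ⟨⟨hg, hz⟩, hzs⟩
      exact ⟨by rw [hqget z hz, if_neg hzs]; exact hg, hz⟩
  refine ⟨by simp [hlenP], by simp [hrk], ?_, ?_⟩
  · intro x hx hxlt
    simp only [List.length_map] at hxlt
    obtain ⟨r0, l0, hP, hnd0, hlab⟩ := hpaths x hx hxlt
    by_cases hr0s : r0 = s
    · subst hr0s
      have hwl0 : w ∉ l0 := by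
        intro hmem
        obtain ⟨lw, hlw⟩ := RPath_mem hP w hmem
        obtain ⟨h1, -⟩ := RPath_det hlw (RPath.root w hwroot.1 hw0)
        exact hsw h1.symm
      refine ⟨w, l0 ++ [w], ?_, ?_, ?_⟩
      · refine RPath_snoc hP ?_ ?_ hsw hqw hw0
        · intro i hi hir
          rw [hqget i (RPath_elem_range hP i hi).1, if_neg hir]
        · rw [hqget r0 hs0, if_pos rfl]
      · simp only [List.nodup_append, List.nodup_singleton, true_and]
        refine ⟨hnd0, ?_⟩
        intro a ha b hb
        rw [List.mem_singleton] at hb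
        subst hb
        intro h
        exact hwl0 (h ▸ ha)
      · rw [pyGet?_map, pyGet?_map, hfw, ← hlab, hfs]
    · have hnots : s ∉ l0 := by
        intro hmem
        obtain ⟨ls, hls⟩ := RPath_mem hP s hmem
        obtain ⟨h1, -⟩ := RPath_det hls (RPath.root s hsroot.1 hs0)
        exact hr0s h1
      refine ⟨r0, l0, ?_, hnd0, ?_⟩
      · refine RPath_untouched hP ?_
        intro i hi
        rw [hqget i (RPath_elem_range hP i hi).1, if_neg ?_]
        intro h1
        exact hnots (h1 ▸ hi)
      · rw [pyGet?_map, pyGet?_map, hlab]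
  · intro r1 r2 h1 h2 hlab
    obtain ⟨h1p, h1s⟩ := (hrootq r1).mp h1
    obtain ⟨h2p, h2s⟩ := (hrootq r2).mp h2
    rw [pyGet?_map, pyGet?_map] at hlab
    obtain ⟨a1, ha1⟩ := pyGet?_some_of_range comp r1 h1p.2
      (by rw [← hlenP]; exact pyGet?_lt h1p.1 h1p.2)
    obtain ⟨a2, ha2⟩ := pyGet?_some_of_range comp r2 h2p.2
      (by rw [← hlenP]; exact pyGet?_lt h2p.1 h2p.2)
    rw [ha1, ha2] at hlab
    simp only [Option.map_some, Option.some_inj] at hlab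
    by_cases haa : a1 = a2
    · exact hinj r1 r2 h1p h2p (by rw [ha1, ha2, haa])
    · have key : (a1 = cv ∧ a2 = cu) ∨ (a1 = cu ∧ a2 = cv) := by
        by_cases c1 : a1 = cv
        · by_cases c2 : a2 = cv
          · exact absurd (c1.trans c2.symm) haa
          · rw [if_pos c1, if_neg c2] at hlab
            exact Or.inl ⟨c1, hlab.symm⟩
        · by_cases c2 : a2 = cv
          · rw [if_neg c1, if_pos c2] at hlab
            exact Or.inr ⟨hlab, c2⟩
          · rw [if_neg c1, if_neg c2] at hlab
            exact absurd hlab haa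
      have hrr : (r1 = rv ∧ r2 = ru) ∨ (r1 = ru ∧ r2 = rv) := by
        rcases key with ⟨k1, k2⟩ | ⟨k1, k2⟩
        · exact Or.inl ⟨hinj r1 rv h1p hrv (by rw [ha1, hcv, k1]),
            hinj r2 ru h2p hru (by rw [ha2, hcu, k2])⟩
        · exact Or.inr ⟨hinj r1 ru h1p hru (by rw [ha1, hcu, k1]),
            hinj r2 rv h2p hrv (by rw [ha2, hcv, k2])⟩
      exfalso
      rcases hw with ⟨-, h2'⟩ | ⟨-, h2'⟩ <;> rcases hrr with ⟨k1, k2⟩ | ⟨k1, k2⟩ <;> subst h2'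
      · exact h1s k1
      · exact h2s k2
      · exact h2s k2
      · exact h1s k1

theorem pyGet?_some_of_inrange {α : Type} (xs : List α) (i : Int)
    (h1 : -(xs.length : Int) ≤ i) (h2 : i < xs.length) :
    ∃ a, PySem.List.pyGet? xs i = some a := by
  rcases lt_or_ge i 0 with hneg | hpos
  · rw [pyGet?_wrap xs i h1 hneg]
    exact pyGet?_some_of_range xs _ (by omega) (by omega)
  · exact pyGet?_some_of_range xs i hpos h2

-- one find call, packaged: result, compression spec, invariant preservation, label agreement
theorem find_step {parent rank comp : List Int} {fuel : Nat} (hInv : StInv parent rank comp)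
    (t : Int) (ht1 : -(comp.length : Int) ≤ t) (ht2 : t < (comp.length : Int))
    (hfuel : comp.length + 1 ≤ fuel) :
    ∃ r l p', RPath parent (if t < 0 then t + comp.length else t) r l ∧ l.Nodup ∧
      ufFind fuel parent t = some (r, p') ∧ CSpec parent l r p' ∧ StInv p' rank comp ∧
      IsRoot parent r ∧ PySem.List.pyGet? comp r = PySem.List.pyGet? comp t := by
  obtain ⟨hlenP, hlenR, hpaths, hinj⟩ := hInv
  have hnt0 : 0 ≤ (if t < 0 then t + (comp.length : Int) else t) := by split_ifs <;> omega
  have hntlt : (if t < 0 then t + (comp.length : Int) else t) < comp.length := by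
    split_ifs <;> omega
  obtain ⟨r, l, hP, hnd, hlab⟩ := hpaths _ hnt0 hntlt
  have hP' : RPath parent (if t < 0 then t + (parent.length : Int) else t) r l := by
    rw [hlenP]; exact hP
  have hlb : l.length + 1 ≤ fuel := by
    have := RPath_len_le hP hnd
    omega
  obtain ⟨p', hF, hC⟩ := ufFind_any (x := t) (by rw [hlenP]; omega) (by rw [hlenP]; omega) hP' hlb
  refine ⟨r, l, p', hP, hnd, hF, hC,
    StInv_cspec ⟨hlenP, hlenR, hpaths, hinj⟩ hP' hC, RPath_root hP, ?_⟩
  rcases lt_or_ge t 0 with hneg | hpos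
  · rw [pyGet?_wrap comp t ht1 hneg]
    rw [if_pos hneg] at hlab
    exact hlab
  · rw [if_neg (by omega)] at hlab
    exact hlab

theorem loop_eq : ∀ (edges : List (Int × Int)) (parent rank comp : List Int) (fuel : Nat),
    StInv parent rank comp → comp.length + 1 ≤ fuel →
    (∀ e ∈ edges, (-(comp.length : Int) ≤ e.1 ∧ e.1 < comp.length) ∧
                  (-(comp.length : Int) ≤ e.2 ∧ e.2 < comp.length)) →
    ufLoop fuel parent rank edges = relabelLoop comp edges := by
  intro edges
  induction edges with
  | nil => intro parent rank comp fuel _ _ _; rfl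
  | cons e rest ih =>
    obtain ⟨u, v⟩ := e
    intro parent rank comp fuel hInv hfuel hrange
    obtain ⟨⟨hu1, hu2⟩, hv1, hv2⟩ := hrange (u, v) List.mem_cons_self
    obtain ⟨ru, lu, p1, hPu, hndu, hFu, hCu, hInv1, hRu, hlabu⟩ :=
      find_step hInv u hu1 hu2 hfuel
    obtain ⟨rv, lv, p2, hPv2, hndv, hFv, hCv, hInv2, hRv1, hlabv⟩ :=
      find_step hInv1 v hv1 hv2 hfuel
    obtain ⟨cu, hcu⟩ := pyGet?_some_of_inrange comp u hu1 hu2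
    obtain ⟨cv, hcv⟩ := pyGet?_some_of_inrange comp v hv1 hv2
    have hcru : PySem.List.pyGet? comp ru = some cu := by rw [hlabu, hcu]
    have hcrv : PySem.List.pyGet? comp rv = some cv := by rw [hlabv, hcv]
    -- rv is a root of p1; transfer to parent
    have hRv : IsRoot parent rv := (CSpec_root_iff hPu hCu rv).mp hRv1
    simp only [ufLoop, relabelLoop, hFu, hFv, hcu, hcv]
    by_cases hrr : ru = rv
    · have hceq : cu = cv := by
        have := hcru
        rw [hrr, hcrv] at this
        exact (Option.some_inj.mp this).symm
      rw [if_pos hrr, if_pos hceq]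
    · have hcne : cu ≠ cv := by
        intro h
        exact hrr (hInv.2.2.2 ru rv hRu hRv (by rw [hcru, hcrv, h]))
      rw [if_neg hrr, if_neg hcne]
      -- A now runs union(u, v) on p2; the two finds inside return ru, rv again
      obtain ⟨lu1, hPu1, hndu1, -⟩ := CSpec_rpath hPu hCu _ _ _ hPu hndu
      obtain ⟨lu2, hPu2, hndu2, -⟩ := CSpec_rpath hPv2 hCv _ _ _ hPu1 hndu1
      have hlen2 : p2.length = comp.length := hInv2.1
      have hPu2' : RPath p2 (if u < 0 then u + (p2.length : Int) else u) ru lu2 := by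
        rw [hlen2]; exact hPu2
      have hlb2 : lu2.length + 1 ≤ fuel := by
        have h := RPath_len_le hPu2 hndu2
        rw [hlen2] at h
        omega
      obtain ⟨p3, hFu3, hCu3⟩ := ufFind_any (x := u) (by rw [hlen2]; omega)
        (by rw [hlen2]; omega) hPu2' hlb2
      have hInv3 : StInv p3 rank comp := StInv_cspec hInv2 hPu2' hCu3
      obtain ⟨lv2, hPv2b, hndv2, -⟩ := CSpec_rpath hPv2 hCv _ _ _ hPv2 hndv
      obtain ⟨lv3, hPv3, hndv3, -⟩ := CSpec_rpath hPu2' hCu3 _ _ _ hPv2b hndv2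
      have hlen3 : p3.length = comp.length := hInv3.1
      have hPv3' : RPath p3 (if v < 0 then v + (p3.length : Int) else v) rv lv3 := by
        rw [hlen3]
        exact hPv3
      have hlb3 : lv3.length + 1 ≤ fuel := by
        have h := RPath_len_le hPv3 hndv3
        rw [hlen3] at h
        omega
      obtain ⟨p4, hFv4, hCv4⟩ := ufFind_any (x := v) (by rw [hlen3]; omega)
        (by rw [hlen3]; omega) hPv3' hlb3
      have hInv4 : StInv p4 rank comp := StInv_cspec hInv3 hPv3' hCv4
      -- roots transfer down to p4
      have hR1 : IsRoot p1 ru := (CSpec_root_iff hPu hCu ru).mpr hRu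
      have hR2 : IsRoot p2 ru := (CSpec_root_iff hPv2 hCv ru).mpr hR1
      have hR3 : IsRoot p3 ru := (CSpec_root_iff hPu2' hCu3 ru).mpr hR2
      have hRu4 : IsRoot p4 ru := (CSpec_root_iff hPv3' hCv4 ru).mpr hR3
      have hSv2 : IsRoot p2 rv := (CSpec_root_iff hPv2 hCv rv).mpr hRv1
      have hSv3 : IsRoot p3 rv := (CSpec_root_iff hPu2' hCu3 rv).mpr hSv2
      have hRv4 : IsRoot p4 rv := (CSpec_root_iff hPv3' hCv4 rv).mpr hSv3
      -- rank lookups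
      have hrkl : rank.length = comp.length := hInv.2.1
      have hru_lt : ru < (comp.length : Int) := by
        have h := pyGet?_lt hRu.1 hRu.2
        rw [hInv.1] at h
        exact h
      have hrv_lt : rv < (comp.length : Int) := by
        have h := pyGet?_lt hRv.1 hRv.2
        rw [hInv.1] at h
        exact h
      obtain ⟨ra, hra⟩ := pyGet?_some_of_range rank ru hRu.2 (by rw [hrkl]; exact hru_lt)
      obtain ⟨rb, hrb⟩ := pyGet?_some_of_range rank rv hRv.2 (by rw [hrkl]; exact hrv_lt)
      have hru4_lt : ru < (p4.length : Int) := by rw [hInv4.1]; exact hru_lt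
      have hrv4_lt : rv < (p4.length : Int) := by rw [hInv4.1]; exact hrv_lt
      have hfuel' : (comp.map fun c => if c = cv then cu else c).length + 1 ≤ fuel := by
        simpa using hfuel
      have hrange' : ∀ e ∈ rest,
          (-(((comp.map fun c => if c = cv then cu else c).length : Nat) : Int) ≤ e.1 ∧
            e.1 < ((comp.map fun c => if c = cv then cu else c).length : Nat)) ∧
          (-(((comp.map fun c => if c = cv then cu else c).length : Nat) : Int) ≤ e.2 ∧
            e.2 < ((comp.map fun c => if c = cv then cu else c).length : Nat)) := by
        intro e he
        have := hrange e (List.mem_cons_of_mem _ he)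
        simpa using this
      by_cases hb1 : ra < rb
      · have hU : ufUnion fuel p2 rank u v = some (p4.set ru.toNat rv, rank) := by
          simp only [ufUnion, hFu3, hFv4]
          rw [if_neg hrr]
          simp only [hra, hrb]
          rw [if_pos hb1, pySet?_nonneg p4 ru rv hRu.2 hru4_lt]
        simp only [hU]
        exact ih (p4.set ru.toNat rv) rank _ fuel
          (StInv_union hInv4 hRu4 hRv4 hrr hcru hcrv (Or.inr ⟨rfl, rfl⟩) hrkl)
          hfuel' hrange'
      · by_cases hb2 : ra > rb
        · have hU : ufUnion fuel p2 rank u v = some (p4.set rv.toNat ru, rank) := by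
            simp only [ufUnion, hFu3, hFv4]
            rw [if_neg hrr]
            simp only [hra, hrb]
            rw [if_neg hb1, if_pos hb2, pySet?_nonneg p4 rv ru hRv.2 hrv4_lt]
          simp only [hU]
          exact ih (p4.set rv.toNat ru) rank _ fuel
            (StInv_union hInv4 hRu4 hRv4 hrr hcru hcrv (Or.inl ⟨rfl, rfl⟩) hrkl)
            hfuel' hrange'
        · have hU : ufUnion fuel p2 rank u v =
              some (p4.set rv.toNat ru, rank.set ru.toNat (ra + 1)) := by
            simp only [ufUnion, hFu3, hFv4]
            rw [if_neg hrr]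
            simp only [hra, hrb]
            rw [if_neg hb1, if_neg hb2, pySet?_nonneg p4 rv ru hRv.2 hrv4_lt]
            rw [pySet?_nonneg rank ru (ra + 1) hRu.2 (by rw [hrkl]; exact hru_lt)]
          simp only [hU]
          exact ih (p4.set rv.toNat ru) (rank.set ru.toNat (ra + 1)) _ fuel
            (StInv_union hInv4 hRu4 hRv4 hrr hcru hcrv (Or.inl ⟨rfl, rfl⟩)
              (by rw [List.length_set]; exact hrkl))
            hfuel' hrange'
  

-- ===== VERDICT (by name: the statement is the Claim_ definition above) =====
theorem is_spanning_tree_spec : Claim_equal_is_spanning_tree := by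
  intro n edges _ hpre
  unfold Spec_is_spanning_tree
  by_cases hlen : (edges.length : Int) ≠ n - 1
  · simp only [is_spanning_tree, is_spanning_tree_alt, if_pos hlen]
  · rw [not_not] at hlen
    have hn1 : 1 ≤ n := by omega
    rcases hpre with h | hrange
    · exact absurd hlen h
    have hlenR : (PySem.List.pyRange 0 n 1).length = n.toNat := by
      rw [PySem.List.length_pyRange_one]
      simp
    have hgetR : ∀ x : Int, 0 ≤ x → x < n →
        PySem.List.pyGet? (PySem.List.pyRange 0 n 1) x = some x := by
      intro x hx hxlt
      rw [PySem.List.pyGet?_of_nonneg _ hx, PySem.List.getElem?_pyRange_one]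
      rw [if_pos (by omega : x.toNat < (n - 0).toNat)]
      congr 1
      omega
    have hcast : ((PySem.List.pyRange 0 n 1).length : Int) = n := by
      rw [hlenR]; omega
    have hInv : StInv (PySem.List.pyRange 0 n 1) (List.replicate n.toNat 0)
        (PySem.List.pyRange 0 n 1) := by
      refine ⟨rfl, by simp [hlenR], ?_, ?_⟩
      · intro x hx hxlt
        rw [hcast] at hxlt
        exact ⟨x, [x], RPath.root x (hgetR x hx hxlt) hx, List.nodup_singleton x, rfl⟩
      · intro r r' hr hr' hlab
        rw [hr.1, hr'.1] at hlab
        exact Option.some_inj.mp hlab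
    have hranges : ∀ e ∈ edges,
        (-(((PySem.List.pyRange 0 n 1).length : Nat) : Int) ≤ e.1 ∧
          e.1 < ((PySem.List.pyRange 0 n 1).length : Nat)) ∧
        (-(((PySem.List.pyRange 0 n 1).length : Nat) : Int) ≤ e.2 ∧
          e.2 < ((PySem.List.pyRange 0 n 1).length : Nat)) := by
      intro e he
      obtain ⟨⟨h1, h2⟩, h3, h4⟩ := hrange e he
      rw [hcast]
      exact ⟨⟨h1, h2⟩, h3, h4⟩
    have hloop := loop_eq edges (PySem.List.pyRange 0 n 1) (List.replicate n.toNat 0)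
      (PySem.List.pyRange 0 n 1) ((PySem.List.pyRange 0 n 1).length + 1) hInv
      (Nat.le_refl _) hranges
    simp only [is_spanning_tree, is_spanning_tree_alt,
      if_neg (by omega : ¬ (edges.length : Int) ≠ n - 1), hloop]
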